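-- pv_equiv track=rewrite | github.com/michelmassaad/TP_FINAL | funciones/puntos.py | verificar_rondas_ganadas_truco
-- ===== SOURCE A (Python) =====
-- def verificar_rondas_ganadas_truco(lista_carta_seleccionada:list,
--                                    lista_lanzada_computadora:list) -> tuple:
--     '''
--     verifica cada una de las manos jugadas con respecto a su jerarquia y toma los criterios
--     de deseempates posibles y lo almacena en un marcador de rondas luego retorna el marcador
--     de rondas ganadas
--     '''
--     rondas_ganadas_jugador = 0
--     rondas_ganadas_computadora = 0
--     manos_ganadas = []  # Lista para almacenar quién ganó cada mano
--
--     for i in range(len(lista_carta_seleccionada)):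
--         carta_jugador = lista_carta_seleccionada[i]
--         carta_computadora = lista_lanzada_computadora[i]
--
--         if carta_jugador["jerarquia"] > carta_computadora["jerarquia"]:
--             rondas_ganadas_jugador += 1
--             manos_ganadas.append("jugador")  # El jugador gana esta mano
--         elif carta_computadora["jerarquia"] >  carta_jugador["jerarquia"]:
--             rondas_ganadas_computadora += 1
--             manos_ganadas.append("computadora")  # La computadora gana esta mano
--         else:
--             manos_ganadas.append("empate")  # Empate en la mano
--
--     #CRITERIO DE DESEMPATE
--     # Ahora verificamos si las 3 rondas fueron jugadas
--     if len(manos_ganadas) == 3: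
--         # Si las rondas ganadas son iguales, verificamos el empate en las manos
--         if rondas_ganadas_jugador == rondas_ganadas_computadora:
--             # Verificar si la primera mano fue empate
--             if manos_ganadas[0] == "empate":
--                 # Si la primera fue empate, ver la segunda mano
--                 if manos_ganadas[1] == "jugador":
--                     rondas_ganadas_jugador += 1
--                 elif manos_ganadas[1] == "computadora":
--                     rondas_ganadas_computadora += 1
--                 else:
--                     # Si también hay empate en la segunda, decidir con la tercera mano
--                     if manos_ganadas[2] == "jugador":
--                         rondas_ganadas_jugador += 1
--                     elif manos_ganadas[2] == "computadora":
--                         rondas_ganadas_computadora += 1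
--             else:
--                 # Si la primera mano no fue empate, le asignamos la ronda al que ganó la primera mano
--                 if manos_ganadas[0] == "jugador":
--                     rondas_ganadas_jugador += 1  # El jugador gana la ronda por la primera mano
--                 else:
--                     rondas_ganadas_computadora += 1  # La computadora gana la ronda por la primera mano
--
--     # Al final, devolvemos el marcador
--     return rondas_ganadas_jugador, rondas_ganadas_computadora
-- ===== SOURCE B (Python) =====
-- def verificar_rondas_ganadas_truco(lista_carta_seleccionada: list,
--                                    lista_lanzada_computadora: list) -> tuple:
--     def marcador(pares):
--         # devuelve (ganadas_jugador, ganadas_computadora, signo de la primera mano decisiva; 0 si no hay)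
--         if not pares:
--             return 0, 0, 0
--         (carta_jugador, carta_computadora) = pares[0]
--         rj, rc, primero = marcador(pares[1:])
--         d = carta_jugador["jerarquia"] - carta_computadora["jerarquia"]
--         if d > 0:
--             return rj + 1, rc, 1
--         if d < 0:
--             return rj, rc + 1, -1
--         return rj, rc, primero
--
--     pares = list(zip(lista_carta_seleccionada, lista_lanzada_computadora))
--     rj, rc, primero = marcador(pares)
--     if len(pares) == 3 and rj == rc:
--         if primero > 0:
--             rj += 1
--         elif primero < 0:
--             rc += 1
--     return rj, rc
-- ===== Notes on version B (the rewrite author's own statement) =====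
-- stated objective: alternative
-- what changed: B never builds A's outcome-string list or its nested positional tie-break tree: it recurses over the zipped pairs on numeric jerarquia differences, returning both tallies together with the sign of the first decisive hand, and resolves a 3-hand tie from that sign alone.
import Mathlib
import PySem

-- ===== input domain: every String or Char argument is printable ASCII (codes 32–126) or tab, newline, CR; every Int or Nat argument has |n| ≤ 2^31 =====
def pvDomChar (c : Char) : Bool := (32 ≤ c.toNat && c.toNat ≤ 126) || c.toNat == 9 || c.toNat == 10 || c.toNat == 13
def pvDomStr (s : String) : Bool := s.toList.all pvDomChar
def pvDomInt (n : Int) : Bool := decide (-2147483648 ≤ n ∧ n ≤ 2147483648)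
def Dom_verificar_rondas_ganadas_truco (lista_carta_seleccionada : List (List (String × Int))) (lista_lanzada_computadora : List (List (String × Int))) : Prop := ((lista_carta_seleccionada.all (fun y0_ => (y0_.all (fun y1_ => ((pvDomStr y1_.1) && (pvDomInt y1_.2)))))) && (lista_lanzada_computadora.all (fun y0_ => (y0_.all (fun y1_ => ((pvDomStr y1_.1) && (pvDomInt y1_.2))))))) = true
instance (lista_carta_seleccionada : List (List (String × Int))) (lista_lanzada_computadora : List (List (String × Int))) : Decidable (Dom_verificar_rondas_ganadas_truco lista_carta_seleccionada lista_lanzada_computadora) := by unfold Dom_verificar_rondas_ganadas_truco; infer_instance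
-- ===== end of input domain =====

-- B drops A's outcome-string list and nested positional tie-break tree: it recurses over the
-- zipped pairs on numeric jerarquia differences and resolves a 3-hand tie from the sign of the
-- first decisive hand; objective: alternative.

-- shared helper: first-match lookup of the "jerarquia" key in a card (Python dict lookup);
-- jerVal's default is never reached inside Pre_ (the key is present there)
def jerGet (c : List (String × Int)) : Option Int :=
  (c.find? (fun p => p.1 == "jerarquia")).map Prod.snd

def jerVal (c : List (String × Int)) : Int := (jerGet c).getD 0

-- ===== PORT A =====
def verificar_rondas_ganadas_truco (lista_carta_seleccionada : List (List (String × Int))) (lista_lanzada_computadora : List (List (String × Int))) : Int × Int :=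
  let st := (List.range lista_carta_seleccionada.length).foldl
    (fun (st : Int × Int × List String) (i : Nat) =>
      let carta_jugador := (PySem.List.pyGet? lista_carta_seleccionada (i : Int)).getD []
      let carta_computadora := (PySem.List.pyGet? lista_lanzada_computadora (i : Int)).getD []
      if jerVal carta_jugador > jerVal carta_computadora then
        (st.1 + 1, st.2.1, st.2.2 ++ ["jugador"])
      else if jerVal carta_computadora > jerVal carta_jugador then
        (st.1, st.2.1 + 1, st.2.2 ++ ["computadora"])
      else
        (st.1, st.2.1, st.2.2 ++ ["empate"]))
    (0, 0, [])
  let rondas_ganadas_jugador := st.1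
  let rondas_ganadas_computadora := st.2.1
  let manos_ganadas := st.2.2
  if manos_ganadas.length = 3 then
    if rondas_ganadas_jugador = rondas_ganadas_computadora then
      if (PySem.List.pyGet? manos_ganadas 0).getD "" = "empate" then
        if (PySem.List.pyGet? manos_ganadas 1).getD "" = "jugador" then
          (rondas_ganadas_jugador + 1, rondas_ganadas_computadora)
        else if (PySem.List.pyGet? manos_ganadas 1).getD "" = "computadora" then
          (rondas_ganadas_jugador, rondas_ganadas_computadora + 1)
        else
          if (PySem.List.pyGet? manos_ganadas 2).getD "" = "jugador" then
            (rondas_ganadas_jugador + 1, rondas_ganadas_computadora)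
          else if (PySem.List.pyGet? manos_ganadas 2).getD "" = "computadora" then
            (rondas_ganadas_jugador, rondas_ganadas_computadora + 1)
          else (rondas_ganadas_jugador, rondas_ganadas_computadora)
      else
        if (PySem.List.pyGet? manos_ganadas 0).getD "" = "jugador" then
          (rondas_ganadas_jugador + 1, rondas_ganadas_computadora)
        else (rondas_ganadas_jugador, rondas_ganadas_computadora + 1)
    else (rondas_ganadas_jugador, rondas_ganadas_computadora)
  else (rondas_ganadas_jugador, rondas_ganadas_computadora)

-- ===== PORT B =====
-- Source B's inner recursive helper 'marcador': (wins_player, wins_computer, sign of first decisive hand)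
def marcadorB : List ((List (String × Int)) × (List (String × Int))) → Int × Int × Int
  | [] => (0, 0, 0)
  | p :: resto =>
      let r := marcadorB resto
      let d := jerVal p.1 - jerVal p.2
      if d > 0 then (r.1 + 1, r.2.1, 1)
      else if d < 0 then (r.1, r.2.1 + 1, -1)
      else (r.1, r.2.1, r.2.2)

def verificar_rondas_ganadas_truco_alt (lista_carta_seleccionada : List (List (String × Int))) (lista_lanzada_computadora : List (List (String × Int))) : Int × Int :=
  let pares := lista_carta_seleccionada.zip lista_lanzada_computadora
  let r := marcadorB pares
  if pares.length = 3 ∧ r.1 = r.2.1 then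
    if r.2.2 > 0 then (r.1 + 1, r.2.1)
    else if r.2.2 < 0 then (r.1, r.2.1 + 1)
    else (r.1, r.2.1)
  else (r.1, r.2.1)

-- ===== PRECONDITION & SPEC =====
-- Pre_ excludes exactly the inputs on which Python A raises: an index past the end of
-- lista_lanzada_computadora (IndexError) or a compared card missing the "jerarquia" key (KeyError).
def Pre_verificar_rondas_ganadas_truco (lista_carta_seleccionada : List (List (String × Int))) (lista_lanzada_computadora : List (List (String × Int))) : Prop :=
  lista_carta_seleccionada.length ≤ lista_lanzada_computadora.length ∧
  (∀ c ∈ lista_carta_seleccionada, (jerGet c).isSome) ∧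
  (∀ c ∈ lista_lanzada_computadora.take lista_carta_seleccionada.length, (jerGet c).isSome)
instance (lista_carta_seleccionada : List (List (String × Int))) (lista_lanzada_computadora : List (List (String × Int))) : Decidable (Pre_verificar_rondas_ganadas_truco lista_carta_seleccionada lista_lanzada_computadora) := by unfold Pre_verificar_rondas_ganadas_truco; infer_instance

def pvWitness_verificar_rondas_ganadas_truco : (List (List (String × Int))) × (List (List (String × Int))) :=
  ([[("jerarquia", 5)], [("jerarquia", 2)], [("jerarquia", 3)]],
   [[("jerarquia", 5)], [("jerarquia", 7)], [("jerarquia", 1)]])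

def Spec_verificar_rondas_ganadas_truco (lista_carta_seleccionada : List (List (String × Int))) (lista_lanzada_computadora : List (List (String × Int))) (out : Int × Int) : Prop := out = verificar_rondas_ganadas_truco_alt lista_carta_seleccionada lista_lanzada_computadora
instance (lista_carta_seleccionada : List (List (String × Int))) (lista_lanzada_computadora : List (List (String × Int))) (out : Int × Int) : Decidable (Spec_verificar_rondas_ganadas_truco lista_carta_seleccionada lista_lanzada_computadora out) := by unfold Spec_verificar_rondas_ganadas_truco; infer_instance

-- ===== CLAIM (what is proved, stated in full; the proofs are below) =====
def Claim_equal_verificar_rondas_ganadas_truco : Prop := ∀ (lista_carta_seleccionada : List (List (String × Int))) (lista_lanzada_computadora : List (List (String × Int))), Dom_verificar_rondas_ganadas_truco lista_carta_seleccionada lista_lanzada_computadora → Pre_verificar_rondas_ganadas_truco lista_carta_seleccionada lista_lanzada_computadora → Spec_verificar_rondas_ganadas_truco lista_carta_seleccionada lista_lanzada_computadora (verificar_rondas_ganadas_truco lista_carta_seleccionada lista_lanzada_computadora)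

-- ===== LEMMAS AND PROOFS =====

-- the per-hand outcome used to analyse A's loop
def pvOutcome (sel comp : List (List (String × Int))) (i : Nat) : String :=
  if jerVal ((PySem.List.pyGet? sel (i : Int)).getD []) >
     jerVal ((PySem.List.pyGet? comp (i : Int)).getD []) then "jugador"
  else if jerVal ((PySem.List.pyGet? comp (i : Int)).getD []) >
          jerVal ((PySem.List.pyGet? sel (i : Int)).getD []) then "computadora"
  else "empate"

-- the same outcome as a function of the zipped pair (B's view)
def pvTag (p : (List (String × Int)) × (List (String × Int))) : String :=
  if jerVal p.1 > jerVal p.2 then "jugador"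
  else if jerVal p.2 > jerVal p.1 then "computadora"
  else "empate"

def pvFirstSign : List String → Int
  | [] => 0
  | m :: rest => if m = "jugador" then 1 else if m = "computadora" then -1 else pvFirstSign rest

lemma pvLoop_eq (sel comp : List (List (String × Int))) (L : List Nat)
    (a b : Int) (l : List String) :
    L.foldl
      (fun (st : Int × Int × List String) (i : Nat) =>
        let carta_jugador := (PySem.List.pyGet? sel (i : Int)).getD []
        let carta_computadora := (PySem.List.pyGet? comp (i : Int)).getD []
        if jerVal carta_jugador > jerVal carta_computadora then
          (st.1 + 1, st.2.1, st.2.2 ++ ["jugador"])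
        else if jerVal carta_computadora > jerVal carta_jugador then
          (st.1, st.2.1 + 1, st.2.2 ++ ["computadora"])
        else
          (st.1, st.2.1, st.2.2 ++ ["empate"]))
      (a, b, l)
    = (a + ((L.map (pvOutcome sel comp)).count "jugador" : Int),
       b + ((L.map (pvOutcome sel comp)).count "computadora" : Int),
       l ++ L.map (pvOutcome sel comp)) := by
  induction L generalizing a b l with
  | nil => simp
  | cons i L ih =>
      simp only [List.foldl_cons, List.map_cons, pvOutcome]
      split_ifs with h1 h2
      · rw [ih]; simp; omega
      · rw [ih]; simp; omega
      · rw [ih]; simp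

-- B's recursion computes the two tag-counts and the sign of the first decisive hand
lemma pvMarcadorB_char (pares : List ((List (String × Int)) × (List (String × Int)))) :
    marcadorB pares = (((pares.map pvTag).count "jugador" : Int),
                       ((pares.map pvTag).count "computadora" : Int),
                       pvFirstSign (pares.map pvTag)) := by
  induction pares with
  | nil => simp [marcadorB, pvFirstSign]
  | cons p rest ih =>
      simp only [marcadorB, List.map_cons, pvTag, ih]
      rcases lt_trichotomy (jerVal p.2) (jerVal p.1) with h | h | h
      · have h1 : jerVal p.1 > jerVal p.2 := h
        simp [h1, pvFirstSign]
      · simp [pvFirstSign, h]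
      · have h1 : ¬ jerVal p.1 > jerVal p.2 := by omega
        simp [h1, h, pvFirstSign]

-- under Pre_'s length condition A's index-based outcome list is B's zip-based one
lemma pvManos_eq (sel comp : List (List (String × Int)))
    (hle : sel.length ≤ comp.length) :
    (List.range sel.length).map (pvOutcome sel comp) = (sel.zip comp).map pvTag := by
  apply List.ext_getElem
  · simp [Nat.min_eq_left hle]
  · intro i h1 h2
    have hi : i < sel.length := by simpa using h1
    have hic : i < comp.length := lt_of_lt_of_le hi hle
    simp only [List.getElem_map, List.getElem_range, List.getElem_zip]
    simp [pvOutcome, pvTag, hi, hic]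

-- tie-break equivalence on any outcome list whose elements are the three tags
lemma pvTie_eq (manos : List String)
    (hmem : ∀ m ∈ manos, m = "jugador" ∨ m = "computadora" ∨ m = "empate") :
    (let rj : Int := manos.count "jugador"
     let rc : Int := manos.count "computadora"
     if manos.length = 3 then
       if rj = rc then
         if (PySem.List.pyGet? manos 0).getD "" = "empate" then
           if (PySem.List.pyGet? manos 1).getD "" = "jugador" then (rj + 1, rc)
           else if (PySem.List.pyGet? manos 1).getD "" = "computadora" then (rj, rc + 1)
           else
             if (PySem.List.pyGet? manos 2).getD "" = "jugador" then (rj + 1, rc)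
             else if (PySem.List.pyGet? manos 2).getD "" = "computadora" then (rj, rc + 1)
             else (rj, rc)
         else
           if (PySem.List.pyGet? manos 0).getD "" = "jugador" then (rj + 1, rc)
           else (rj, rc + 1)
       else (rj, rc)
     else (rj, rc))
    =
    (let rj : Int := manos.count "jugador"
     let rc : Int := manos.count "computadora"
     if manos.length = 3 ∧ rj = rc then
       if pvFirstSign manos > 0 then (rj + 1, rc)
       else if pvFirstSign manos < 0 then (rj, rc + 1)
       else (rj, rc)
     else (rj, rc)) := by
  match manos, hmem with
  | [], _ => simp
  | [x], _ => simp
  | [x, y], _ => simp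
  | x :: y :: z :: w :: rest, _ => simp
  | [x, y, z], hmem =>
      have hx := hmem x (by simp)
      have hy := hmem y (by simp)
      have hz := hmem z (by simp)
      rcases hx with hx | hx | hx <;> rcases hy with hy | hy | hy <;>
        rcases hz with hz | hz | hz <;> subst hx hy hz <;> decide

-- ===== VERDICT (by name: the statement is the Claim_ definition above) =====
theorem verificar_rondas_ganadas_truco_spec : Claim_equal_verificar_rondas_ganadas_truco := by
  intro sel comp _ hpre
  unfold Spec_verificar_rondas_ganadas_truco
  have hA := pvLoop_eq sel comp (List.range sel.length) 0 0 []
  have hmem : ∀ m ∈ (List.range sel.length).map (pvOutcome sel comp),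
      m = "jugador" ∨ m = "computadora" ∨ m = "empate" := by
    intro m hm
    rcases List.mem_map.mp hm with ⟨i, _, rfl⟩
    unfold pvOutcome
    split_ifs <;> simp
  have htie := pvTie_eq ((List.range sel.length).map (pvOutcome sel comp)) hmem
  simp only [verificar_rondas_ganadas_truco, verificar_rondas_ganadas_truco_alt, hA,
    pvMarcadorB_char, ← pvManos_eq sel comp hpre.1, Int.zero_add, List.nil_append,
    List.length_zip, List.length_map, List.length_range, Nat.min_eq_left hpre.1] at *
  simpa using htie
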